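-- pv_equiv track=rewrite | github.com/lheun99/Programmers | 코딩테스트 입문/Day25/옹알이(1).py | solution
-- ===== SOURCE A (Python) =====
-- from itertools import permutations as pm
--
-- def solution(babbling):
--     can = ["aya", "ye", "woo", "ma"]
--     can_say = []
--     for i in range(2, 5):
--         can_say += list(pm(can, i))
--     says = []
--     for say in can_say:
--         says.append("".join(list(say)))
--     says += can
--
--     cnt = 0
--     for bab in babbling:
--         if bab in says:
--             cnt += 1
--     return cnt
-- ===== SOURCE B (Python) =====
-- def solution(babbling):
--     words = ["aya", "ye", "woo", "ma"]
--     cnt = 0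
--     for bab in babbling:
--         s = bab
--         used = []
--         ok = True
--         while s:
--             for w in words:
--                 if s.startswith(w) and w not in used:
--                     used.append(w)
--                     s = s[len(w):]
--                     break
--             else:
--                 ok = False
--                 break
--         if ok and used:
--             cnt += 1
--     return cnt
-- ===== Notes on version B (the rewrite author's own statement) =====
-- stated objective: alternative
-- what changed: Replaced A's precomputed table of all 64 permutation-concatenations (plus a per-babbling linear scan of that table) with a greedy left-to-right tokenizer that consumes one of the four words at a time while tracking the set of words already used.
import Mathlib
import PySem

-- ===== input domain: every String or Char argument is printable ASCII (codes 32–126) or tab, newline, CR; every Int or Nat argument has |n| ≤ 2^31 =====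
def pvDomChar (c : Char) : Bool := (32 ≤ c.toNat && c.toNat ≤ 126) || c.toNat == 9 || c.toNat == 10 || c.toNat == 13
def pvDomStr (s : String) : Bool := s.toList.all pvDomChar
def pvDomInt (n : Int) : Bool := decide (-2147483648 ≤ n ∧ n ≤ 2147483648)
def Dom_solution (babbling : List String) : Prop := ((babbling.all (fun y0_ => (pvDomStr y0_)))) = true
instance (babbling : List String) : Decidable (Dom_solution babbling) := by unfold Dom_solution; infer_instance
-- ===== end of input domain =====

-- B replaces A's precomputed table of the 64 word-permutation strings (and a per-babbling
-- linear scan of that table) by a greedy left-to-right tokenizer that consumes one of the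
-- four words at a time while tracking the words already used; same return value (objective:
-- alternative — similar measured speed, structurally different algorithm).

-- ===== PORT A =====
def pvCan : List String := ["aya", "ye", "woo", "ma"]

-- A's precomputed list: permutations of sizes 2..4 joined, then the four words themselves.
def pvSays : List String :=
  (((PySem.List.pyRange 2 5 1).foldl
      (fun acc i => acc ++ PySem.List.permutations pvCan i.toNat) []).foldl
    (fun acc say => acc ++ [PySem.Str.join "" say]) []) ++ pvCan

def solution (babbling : List String) : Int :=
  babbling.foldl (fun cnt bab => if bab ∈ pvSays then cnt + 1 else cnt) 0

-- ===== PORT B =====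
def pvWords : List String := ["aya", "ye", "woo", "ma"]

-- inner 'for w in words: if s.startswith(w) and w not in used: … break / else:' of Source B
def pvPick (ws : List String) (s : List Char) (used : List String) : Option String :=
  match ws with
  | [] => none
  | w :: rest =>
    if PySem.Chars.startswith s w.toList && !used.contains w then some w
    else pvPick rest s used

-- the 'while s:' loop of Source B; fuel (= initial length) only makes the recursion structural
def pvTok : Nat → List Char → List String → Bool
  | _, [], used => !used.isEmpty
  | 0, _ :: _, _ => false
  | fuel+1, c :: cs, used =>
    match pvPick pvWords (c :: cs) used with
    | some w => pvTok fuel ((c :: cs).drop w.toList.length) (used ++ [w])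
    | none => false

def pvAccept (b : String) : Bool := pvTok b.toList.length b.toList []

def solution_alt (babbling : List String) : Int :=
  babbling.foldl (fun cnt bab => if pvAccept bab then cnt + 1 else cnt) 0

-- ===== PRECONDITION & SPEC =====
def Spec_solution (babbling : List String) (out : Int) : Prop := out = solution_alt babbling
instance (babbling : List String) (out : Int) : Decidable (Spec_solution babbling out) := by unfold Spec_solution; infer_instance

-- ===== CLAIM (what is proved, stated in full; the proofs are below) =====
def Claim_equal_solution : Prop := ∀ (babbling : List String), Dom_solution babbling → Spec_solution babbling (solution babbling)

-- ===== LEMMAS AND PROOFS =====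

-- the value of A's table, as a literal (used so the case bash below decides against a literal list)
def pvSaysLit : List String :=
  ["ayaye", "ayawoo", "ayama", "yeaya", "yewoo", "yema", "wooaya", "wooye", "wooma",
   "maaya", "maye", "mawoo", "ayayewoo", "ayayema", "ayawooye", "ayawooma", "ayamaye",
   "ayamawoo", "yeayawoo", "yeayama", "yewooaya", "yewooma", "yemaaya", "yemawoo",
   "wooayaye", "wooayama", "wooyeaya", "wooyema", "woomaaya", "woomaye", "maayaye",
   "maayawoo", "mayeaya", "mayewoo", "mawooaya", "mawooye", "ayayewooma", "ayayemawoo",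
   "ayawooyema", "ayawoomaye", "ayamayewoo", "ayamawooye", "yeayawooma", "yeayamawoo",
   "yewooayama", "yewoomaaya", "yemaayawoo", "yemawooaya", "wooayayema", "wooayamaye",
   "wooyeayama", "wooyemaaya", "woomaayaye", "woomayeaya", "maayayewoo", "maayawooye",
   "mayeayawoo", "mayewooaya", "mawooayaye", "mawooyeaya", "aya", "ye", "woo", "ma"]

lemma pvSays_eq : pvSays = pvSaysLit := by decide

-- B accepts every string of A's table
lemma pv_mem_accept : ∀ b ∈ pvSays, pvAccept b = true := by decide

lemma pv_pick_spec : ∀ (ws : List String) (s : List Char) (used : List String) (w : String),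
    pvPick ws s used = some w → w ∈ ws ∧ w.toList <+: s ∧ w ∉ used := by
  intro ws
  induction ws with
  | nil => intro s used w h; simp [pvPick] at h
  | cons x rest ih =>
    intro s used w h
    rw [pvPick] at h
    by_cases hc : (PySem.Chars.startswith s x.toList && !used.contains x) = true
    · rw [if_pos hc] at h
      injection h with h; subst h
      simp only [Bool.and_eq_true, Bool.not_eq_true', List.contains_eq_mem,
        decide_eq_false_iff_not, PySem.Chars.startswith_iff] at hc
      exact ⟨List.mem_cons_self, hc.1, hc.2⟩
    · rw [if_neg hc] at h
      obtain ⟨h1, h2, h3⟩ := ih s used w h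
      exact ⟨List.mem_cons_of_mem _ h1, h2, h3⟩

lemma pv_tok_sound : ∀ (fuel : Nat) (s : List Char) (used : List String),
    used.Nodup → pvTok fuel s used = true →
    ∃ ws, s = (ws.map String.toList).flatten ∧ (used ++ ws).Nodup ∧ ∀ w ∈ ws, w ∈ pvWords := by
  intro fuel
  induction fuel with
  | zero =>
    intro s used hnd h
    match s with
    | [] => exact ⟨[], by simp, by simpa, by simp⟩
    | c :: cs => simp [pvTok] at h
  | succ f ih =>
    intro s used hnd h
    match s with
    | [] => exact ⟨[], by simp, by simpa, by simp⟩
    | c :: cs =>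
      rw [pvTok] at h
      cases hp : pvPick pvWords (c :: cs) used with
      | none => rw [hp] at h; simp at h
      | some w =>
        rw [hp] at h
        have h' : pvTok f ((c :: cs).drop w.toList.length) (used ++ [w]) = true := h
        obtain ⟨hmem, hpre, hnu⟩ := pv_pick_spec _ _ _ _ hp
        obtain ⟨t, ht⟩ := hpre
        have hdrop : (c :: cs).drop w.toList.length = t := by
          rw [← ht, List.drop_left]
        have hnd' : (used ++ [w]).Nodup :=
          hnd.append (List.nodup_singleton w)
            (by intro a ha hb; exact hnu (List.mem_singleton.mp hb ▸ ha))
        rw [hdrop] at h'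
        obtain ⟨ws', hflat, hndw, hsub⟩ := ih t (used ++ [w]) hnd' h'
        refine ⟨w :: ws', ?_, ?_, ?_⟩
        · simp [← ht, hflat]
        · simpa using hndw
        · intro u hu
          rcases List.mem_cons.mp hu with rfl | hu'
          · exact hmem
          · exact hsub u hu'

-- every nonempty no-repeat sequence over the four words concatenates to an entry of A's table
lemma pv_bash (ws : List String) (hsub : ∀ w ∈ ws, w ∈ pvWords) (hnd : ws.Nodup)
    (hne : ws ≠ []) : String.ofList ((ws.map String.toList).flatten) ∈ pvSays := by
  have hsp : ws.Subperm pvWords := List.Nodup.subperm hnd (fun w hw => hsub w hw)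
  have hlen : ws.length ≤ 4 := by simpa [pvWords] using hsp.length_le
  rw [pvSays_eq]
  obtain _ | ⟨a, _ | ⟨b, _ | ⟨c, _ | ⟨d, _ | ⟨e, tl⟩⟩⟩⟩⟩ := ws
  · exact absurd rfl hne
  · have ha := hsub a (by simp)
    simp only [pvWords, List.mem_cons, List.not_mem_nil, or_false] at ha
    rcases ha with rfl | rfl | rfl | rfl <;> decide
  · have ha := hsub a (by simp); have hb := hsub b (by simp)
    simp only [pvWords, List.mem_cons, List.not_mem_nil, or_false] at ha hb
    rcases ha with rfl | rfl | rfl | rfl <;> rcases hb with rfl | rfl | rfl | rfl <;>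
      revert hnd <;> decide
  · have ha := hsub a (by simp); have hb := hsub b (by simp); have hc := hsub c (by simp)
    simp only [pvWords, List.mem_cons, List.not_mem_nil, or_false] at ha hb hc
    rcases ha with rfl | rfl | rfl | rfl <;> rcases hb with rfl | rfl | rfl | rfl <;>
      rcases hc with rfl | rfl | rfl | rfl <;> revert hnd <;> decide
  · have ha := hsub a (by simp); have hb := hsub b (by simp)
    have hc := hsub c (by simp); have hd := hsub d (by simp)
    simp only [pvWords, List.mem_cons, List.not_mem_nil, or_false] at ha hb hc hd
    rcases ha with rfl | rfl | rfl | rfl <;> rcases hb with rfl | rfl | rfl | rfl <;>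
      rcases hc with rfl | rfl | rfl | rfl <;> rcases hd with rfl | rfl | rfl | rfl <;>
      revert hnd <;> decide
  · simp at hlen; omega

lemma pv_accept_mem (b : String) (h : pvAccept b = true) : b ∈ pvSays := by
  obtain ⟨ws, hflat, hnd, hsub⟩ := pv_tok_sound b.toList.length b.toList [] (by simp) h
  have hne : ws ≠ [] := by
    rintro rfl
    simp only [List.map_nil, List.flatten_nil] at hflat
    rw [pvAccept, hflat] at h
    simp [pvTok] at h
  have hmem := pv_bash ws hsub (by simpa using hnd) hne
  rwa [← hflat, String.ofList_toList] at hmem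

lemma pv_key (b : String) : b ∈ pvSays ↔ pvAccept b = true :=
  ⟨pv_mem_accept b, pv_accept_mem b⟩

-- ===== VERDICT (by name: the statement is the Claim_ definition above) =====
theorem solution_spec : Claim_equal_solution := by
  unfold Claim_equal_solution Spec_solution
  intro babbling _
  unfold solution solution_alt
  have hfun : (fun (cnt : Int) bab => if bab ∈ pvSays then cnt + 1 else cnt)
      = (fun (cnt : Int) bab => if pvAccept bab then cnt + 1 else cnt) := by
    funext cnt bab
    by_cases h : pvAccept bab = true
    · simp [h, (pv_key bab).mpr h]
    · have hm : bab ∉ pvSays := fun hmem => h (pv_mem_accept bab hmem)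
      simp [h, hm]
  rw [hfun]
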